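-- pv_equiv track=rewrite | github.com/tokatoka/cp | atcoder/abc173/e.py | f
-- ===== SOURCE A (Python) =====
-- MOD = pow(10, 9) + 7
--
-- def f(lst):
--     sign = 1
--     res = 1
--     for i in lst:
--         if i[1] < 0:
--             sign *= -1
--             res = (res * (i[0] % MOD)) % MOD
--         else:
--             res = (res * (i[0] % MOD)) % MOD
--     res = sign * res
--     if res < 0:
--         res = res + MOD
--     res = res % MOD
--     return res, sign
-- ===== SOURCE B (Python) =====
-- MOD = pow(10, 9) + 7
--
-- def _prod_mod(xs):
--     # divide-and-conquer modular product of xs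
--     if len(xs) <= 1:
--         return xs[0] % MOD if xs else 1
--     m = len(xs) // 2
--     return _prod_mod(xs[:m]) * _prod_mod(xs[m:]) % MOD
--
-- def f(lst):
--     sign = -1 if sum(i[1] < 0 for i in lst) % 2 else 1
--     return sign * _prod_mod([i[0] for i in lst]) % MOD, sign
-- ===== Notes on version B (the rewrite author's own statement) =====
-- stated objective: alternative
-- what changed: B computes the sign from the parity of a count of negative second components and the residue by a recursive divide-and-conquer modular product over the first components, replacing A's single loop with a running sign toggle, per-step reduction and negative fixup by the closed formula (sign * res) % MOD.
import Mathlib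
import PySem

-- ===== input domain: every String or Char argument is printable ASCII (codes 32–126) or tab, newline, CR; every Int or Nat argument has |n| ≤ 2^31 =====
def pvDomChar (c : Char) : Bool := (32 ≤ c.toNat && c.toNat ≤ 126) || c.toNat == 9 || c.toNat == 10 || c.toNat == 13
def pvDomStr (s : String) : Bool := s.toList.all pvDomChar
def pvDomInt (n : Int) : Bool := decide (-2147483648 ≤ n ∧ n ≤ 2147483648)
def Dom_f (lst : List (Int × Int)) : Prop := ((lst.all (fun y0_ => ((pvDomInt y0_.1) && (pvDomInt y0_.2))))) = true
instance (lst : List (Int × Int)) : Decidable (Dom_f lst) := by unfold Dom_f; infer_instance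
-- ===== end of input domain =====

-- B replaces A's single loop (running sign toggle + negative fixup) by a parity count for the
-- sign and a divide-and-conquer modular product, finished with (sign * res) % MOD: alternative
-- decomposition, same complexity.

def MODc : Int := 10 ^ 9 + 7

-- ===== PORT A =====
def f (lst : List (Int × Int)) : Int × Int :=
  let st := lst.foldl (fun (p : Int × Int) i =>
      if i.2 < 0 then
        (p.1 * (-1), PySem.Int.mod (p.2 * PySem.Int.mod i.1 MODc) MODc)
      else
        (p.1, PySem.Int.mod (p.2 * PySem.Int.mod i.1 MODc) MODc)) (1, 1)
  let res := st.1 * st.2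
  let res := if res < 0 then res + MODc else res
  (PySem.Int.mod res MODc, st.1)

-- ===== PORT B =====
-- divide-and-conquer modular product (port of _prod_mod in Source B)
def prodMod (xs : List Int) : Int :=
  if h : xs.length ≤ 1 then
    match xs with
    | [] => 1
    | x :: _ => PySem.Int.mod x MODc
  else
    let m := xs.length / 2
    PySem.Int.mod (prodMod (xs.take m) * prodMod (xs.drop m)) MODc
termination_by xs.length
decreasing_by
  · simp only [List.length_take]; omega
  · simp only [List.length_drop]; omega

def f_alt (lst : List (Int × Int)) : Int × Int :=
  let sign : Int := if (lst.countP (fun i => decide (i.2 < 0))) % 2 ≠ 0 then -1 else 1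
  (PySem.Int.mod (sign * prodMod (lst.map (fun i => i.1))) MODc, sign)

-- ===== PRECONDITION & SPEC =====
def Spec_f (lst : List (Int × Int)) (out : Int × Int) : Prop := out = f_alt lst
instance (lst : List (Int × Int)) (out : Int × Int) : Decidable (Spec_f lst out) := by unfold Spec_f; infer_instance

-- ===== CLAIM (what is proved, stated in full; the proofs are below) =====
def Claim_equal_f : Prop := ∀ (lst : List (Int × Int)), Dom_f lst → Spec_f lst (f lst)

-- ===== LEMMAS AND PROOFS =====

theorem MODc_pos : (0:Int) < MODc := by decide

theorem mod_is_emod (a : Int) : PySem.Int.mod a MODc = a % MODc :=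
  PySem.Int.mod_eq_emod_of_pos MODc_pos

-- prodMod computes the plain product modulo MODc
theorem prodMod_eq (xs : List Int) : prodMod xs = xs.prod % MODc := by
  induction hn : xs.length using Nat.strong_induction_on generalizing xs with
  | _ n ih =>
  rw [prodMod]
  by_cases h : xs.length ≤ 1
  · rw [dif_pos h]
    match xs with
    | [] => simp; decide
    | [x] => simp [mod_is_emod]
  · rw [dif_neg h]
    have h1 : (xs.take (xs.length / 2)).length < n := by simp [List.length_take]; omega
    have h2 : (xs.drop (xs.length / 2)).length < n := by simp [List.length_drop]; omega
    rw [mod_is_emod, ih _ h1 _ rfl, ih _ h2 _ rfl]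
    rw [← Int.mul_emod]
    rw [← List.prod_append, List.take_append_drop]

-- A's loop: sign is (-1)^(count of negatives), res is the product mod MODc
theorem loopA (lst : List (Int × Int)) (s r : Int) (hr : r % MODc = r) :
    lst.foldl (fun (p : Int × Int) i =>
      if i.2 < 0 then
        (p.1 * (-1), PySem.Int.mod (p.2 * PySem.Int.mod i.1 MODc) MODc)
      else
        (p.1, PySem.Int.mod (p.2 * PySem.Int.mod i.1 MODc) MODc)) (s, r)
    = (s * (-1) ^ (lst.countP (fun i => decide (i.2 < 0))),
       (r * (lst.map (fun i => i.1)).prod) % MODc) := by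
  induction lst generalizing s r with
  | nil => simp [hr]
  | cons i t ih =>
    simp only [List.foldl_cons, List.countP_cons, List.map_cons, List.prod_cons]
    have hacc : PySem.Int.mod (r * PySem.Int.mod i.1 MODc) MODc = (r * i.1) % MODc := by
      simp [mod_is_emod, Int.mul_emod, Int.emod_emod_of_dvd]
    have hr' : (r * i.1) % MODc % MODc = (r * i.1) % MODc := Int.emod_emod_of_dvd _ dvd_rfl
    have hval : ((r * i.1) % MODc * (t.map (fun i => i.1)).prod) % MODc
        = (r * (i.1 * (t.map (fun i => i.1)).prod)) % MODc := by
      rw [Int.mul_emod, hr', ← Int.mul_emod, mul_assoc]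
    by_cases hneg : i.2 < 0
    · rw [if_pos hneg, hacc, ih _ _ hr', hval]
      simp [hneg, pow_succ]
    · rw [if_neg hneg, hacc, ih _ _ hr', hval]
      simp [hneg]

-- ===== VERDICT (by name: the statement is the Claim_ definition above) =====
theorem f_spec : Claim_equal_f := by
  intro lst _
  show f lst = f_alt lst
  unfold f f_alt
  rw [loopA lst 1 1 (by decide), prodMod_eq]
  set c := lst.countP (fun i => decide (i.2 < 0)) with hc
  set p := (lst.map (fun i => i.1)).prod % MODc with hp
  have hp0 : 0 ≤ p := Int.emod_nonneg _ (by decide)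
  have hpM : p < MODc := Int.emod_lt_of_pos _ MODc_pos
  have hsign : (-1 : Int) ^ c = if c % 2 ≠ 0 then -1 else 1 := by
    rcases Nat.even_or_odd c with he | ho
    · rw [he.neg_one_pow, if_neg]; simpa [Nat.even_iff] using he
    · rw [ho.neg_one_pow, if_pos]; simpa [Nat.odd_iff] using ho
  simp only [mod_is_emod, hsign, one_mul]
  split
  · -- odd count: sign = -1
    have : (-1 : Int) * p = -p := by ring
    rw [this]
    by_cases h0 : p = 0
    · simp [h0]
    · have hlt : -p < 0 := by omega
      rw [if_pos hlt]
      have h2 : (-p + MODc) % MODc = -p % MODc := by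
        have h3 := Int.add_mul_emod_self_left (a := -p) (b := MODc) (c := 1)
        simpa using h3
      rw [h2]
  · -- even count: sign = 1
    have : (1 : Int) * p = p := by ring
    rw [this, if_neg (by omega)]
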